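-- pv_equiv track=rewrite | github.com/hexaclock/pythonfun | life_starter/life_starter/life.py | innerCells
-- ===== SOURCE A (Python) =====
-- def createOneRow(width):
-- 	""" returns one row of zeros of width "width"...
-- 	You should use this in your
-- 	createBoard(width, height) function """
-- 	row = []
-- 	for col in range(width):
-- 		row += [0]
-- 	return row
--
-- def createBoard(width,height):
-- 	""" returns a 2d array with "height" rows and "width" cols """
-- 	A = []
-- 	for row in range(height):
-- 		A += [createOneRow(width)]
-- 	return A
--
-- def innerCells(w,h):
-- 	A = createBoard(w,h)
--
-- 	for row in range(h):
-- 		for col in range(w):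
-- 			if row == 0 or col == 0:
-- 				A[row][col] = 0
-- 			elif row == (h-1) or col == (w-1):
-- 				A[row][col] = 0
-- 			else:
-- 				A[row][col] = 1
-- 	return A
-- ===== SOURCE B (Python) =====
-- def innerCells(w, h):
--     if h <= 0:
--         return []
--     zero = [0] * w
--     mid = [0 if c == 0 or c == w - 1 else 1 for c in range(w)]
--     return [list(zero) if r == 0 or r == h - 1 else list(mid) for r in range(h)]
-- ===== Notes on version B (the rewrite author's own statement) =====
-- stated objective: simpler
-- what changed: Replaces A's build-then-mutate (allocate a zero board, then a nested per-cell loop with a four-way positional branch assigning into it) by precomputing two row templates (border row, interior row) and assembling the board in one pass over row indices.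
import Mathlib
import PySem

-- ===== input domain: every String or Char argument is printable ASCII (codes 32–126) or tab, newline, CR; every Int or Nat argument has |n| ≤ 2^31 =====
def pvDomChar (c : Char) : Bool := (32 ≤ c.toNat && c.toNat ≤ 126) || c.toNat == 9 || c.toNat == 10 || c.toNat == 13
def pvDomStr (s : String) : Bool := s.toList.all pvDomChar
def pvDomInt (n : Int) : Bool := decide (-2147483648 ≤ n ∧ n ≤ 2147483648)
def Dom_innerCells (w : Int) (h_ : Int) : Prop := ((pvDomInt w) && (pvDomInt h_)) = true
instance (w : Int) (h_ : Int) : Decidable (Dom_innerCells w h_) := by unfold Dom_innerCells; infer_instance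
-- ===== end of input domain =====

-- B replaces A's build-then-mutate nested per-cell loop by two precomputed row
-- templates selected per row index (objective: simpler).

-- ===== PORT A =====
def createOneRow (width : Int) : List Int :=
  (PySem.List.pyRange 0 width 1).foldl (fun row _col => row ++ [0]) []

def createBoard (width height : Int) : List (List Int) :=
  (PySem.List.pyRange 0 height 1).foldl (fun A _row => A ++ [createOneRow width]) []

def innerCells (w : Int) (h_ : Int) : List (List Int) :=
  (PySem.List.pyRange 0 h_ 1).foldl (fun A row =>
    (PySem.List.pyRange 0 w 1).foldl (fun A col =>
      if row = 0 ∨ col = 0 then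
        PySem.List.pySetD A row (PySem.List.pySetD (PySem.List.pyGetD A row []) col 0)
      else if row = h_ - 1 ∨ col = w - 1 then
        PySem.List.pySetD A row (PySem.List.pySetD (PySem.List.pyGetD A row []) col 0)
      else
        PySem.List.pySetD A row (PySem.List.pySetD (PySem.List.pyGetD A row []) col 1)) A)
    (createBoard w h_)

-- ===== PORT B =====
def innerCells_alt (w : Int) (h_ : Int) : List (List Int) :=
  if h_ ≤ 0 then []
  else
  let zero : List Int := List.replicate w.toNat 0
  let mid : List Int := (PySem.List.pyRange 0 w 1).map (fun c => if c = 0 ∨ c = w - 1 then 0 else 1)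
  (PySem.List.pyRange 0 h_ 1).map (fun r => if r = 0 ∨ r = h_ - 1 then zero else mid)

-- ===== PRECONDITION & SPEC =====
def Spec_innerCells (w : Int) (h_ : Int) (out : List (List Int)) : Prop := out = innerCells_alt w h_
instance (w : Int) (h_ : Int) (out : List (List Int)) : Decidable (Spec_innerCells w h_ out) := by unfold Spec_innerCells; infer_instance

-- ===== CLAIM (what is proved, stated in full; the proofs are below) =====
def Claim_equal_innerCells : Prop := ∀ (w : Int) (h_ : Int), Dom_innerCells w h_ → Spec_innerCells w h_ (innerCells w h_)

-- ===== LEMMAS AND PROOFS =====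

-- the value A assigns to cell (row, col)
def cellA (w h_ row col : Int) : Int :=
  if row = 0 ∨ col = 0 then 0 else if row = h_ - 1 ∨ col = w - 1 then 0 else 1

-- the final content of row `row` of A's board
def rowA (w h_ row : Int) : List Int := (PySem.List.pyRange 0 w 1).map (cellA w h_ row)

lemma foldl_snoc_const {α β : Type} (l : List β) (x : α) (init : List α) :
    l.foldl (fun A _ => A ++ [x]) init = init ++ List.replicate l.length x := by
  induction l generalizing init with
  | nil => simp
  | cons b bs ih =>
    simp only [List.foldl, ih, List.append_assoc, List.length_cons]
    simp [List.replicate_succ]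

lemma createOneRow_eq (w : Int) : createOneRow w = List.replicate w.toNat 0 := by
  rw [createOneRow, foldl_snoc_const]
  simp [PySem.List.length_pyRange_one]

lemma createBoard_eq (w h_ : Int) :
    createBoard w h_ = List.replicate h_.toNat (List.replicate w.toNat 0) := by
  rw [createBoard, foldl_snoc_const]
  simp [PySem.List.length_pyRange_one, createOneRow_eq]

-- A's branchy inner-loop body, as a single assignment of cellA
lemma body_eq (w h_ row : Int) :
    (fun (A : List (List Int)) col =>
      if row = 0 ∨ col = 0 then
        PySem.List.pySetD A row (PySem.List.pySetD (PySem.List.pyGetD A row []) col 0)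
      else if row = h_ - 1 ∨ col = w - 1 then
        PySem.List.pySetD A row (PySem.List.pySetD (PySem.List.pyGetD A row []) col 0)
      else
        PySem.List.pySetD A row (PySem.List.pySetD (PySem.List.pyGetD A row []) col 1))
    = (fun A col =>
        PySem.List.pySetD A row (PySem.List.pySetD (PySem.List.pyGetD A row []) col (cellA w h_ row col))) := by
  funext A col
  unfold cellA
  split_ifs <;> rfl

-- factor the repeated read-modify-write of one row out of the inner fold
lemma fold_set_factor (v : Int → Int) (cols : List Int) (A : List (List Int)) (n : Nat)
    (hn : n < A.length) :
    cols.foldl (fun A col =>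
        PySem.List.pySetD A (n : Int) (PySem.List.pySetD (PySem.List.pyGetD A (n : Int) []) col (v col))) A
    = PySem.List.pySetD A (n : Int)
        (cols.foldl (fun r col => PySem.List.pySetD r col (v col)) (PySem.List.pyGetD A (n : Int) [])) := by
  induction cols generalizing A with
  | nil =>
    simp [List.getD_eq_getElem?_getD, List.getElem?_eq_getElem hn, List.set_getElem_self]
  | cons c cs ih =>
    simp only [List.foldl]
    rw [ih _ (by simp [hn])]
    have hx : PySem.List.pyGetD
        (PySem.List.pySetD A ((n : Nat) : Int)
          (PySem.List.pySetD (PySem.List.pyGetD A ((n : Nat) : Int) []) c (v c))) ((n : Nat) : Int) []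
        = PySem.List.pySetD (PySem.List.pyGetD A ((n : Nat) : Int) []) c (v c) := by
      simp only [PySem.List.pySetD_natCast, PySem.List.pyGetD_natCast, List.getD_eq_getElem?_getD]
      rw [List.getElem?_set_eq_of_lt _ hn]
      rfl
    rw [hx]
    simp only [PySem.List.pySetD_natCast, List.set_set]

lemma set_append_front {α : Type} (p : List α) (k : Nat) (hk : 0 < k) (x y : α) :
    (p ++ List.replicate k x).set p.length y = p ++ y :: List.replicate (k - 1) x := by
  induction p with
  | nil =>
    cases k with
    | zero => omega
    | succ j => simp [List.replicate_succ]
  | cons a as ih => simp [ih]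

lemma getD_append_front {α : Type} (p : List α) (x : α) (t : List α) (d : α) :
    (p ++ x :: t).getD p.length d = x := by
  induction p with
  | nil => rfl
  | cons a as _ih => simp

-- filling the first m cells of a width-W zero row
lemma fill_row (v : Int → Int) (m W : Nat) (hm : m ≤ W) :
    (PySem.List.pyRange 0 (m : Int) 1).foldl (fun r col => PySem.List.pySetD r col (v col))
      (List.replicate W (0 : Int))
    = (PySem.List.pyRange 0 (m : Int) 1).map v ++ List.replicate (W - m) 0 := by
  induction m with
  | zero => simp [PySem.List.pyRange_one_eq_nil]
  | succ j ih =>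
    have hcast : ((j + 1 : Nat) : Int) = (j : Int) + 1 := by push_cast; ring
    rw [hcast, PySem.List.pyRange_one_succ_right (by omega)]
    rw [List.foldl_append, List.map_append, ih (by omega)]
    have hlen : ((PySem.List.pyRange 0 (j : Int) 1).map v).length = j := by
      simp [PySem.List.length_pyRange_one]
    simp only [List.foldl, PySem.List.pySetD_natCast, List.map_cons, List.map_nil]
    have hst := set_append_front ((PySem.List.pyRange 0 (j : Int) 1).map v) (W - j)
      (by omega) 0 (v (j : Int))
    rw [hlen] at hst
    rw [hst]
    have hsub : W - j - 1 = W - (j + 1) := by omega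
    rw [hsub]
    simp

-- filling the first m rows of a height-H zero board
lemma fill_board (w h_ : Int) (m H : Nat) (hm : m ≤ H) :
    (PySem.List.pyRange 0 (m : Int) 1).foldl (fun A row =>
        (PySem.List.pyRange 0 w 1).foldl (fun A col =>
          PySem.List.pySetD A row (PySem.List.pySetD (PySem.List.pyGetD A row []) col (cellA w h_ row col))) A)
      (List.replicate H (List.replicate w.toNat 0))
    = (PySem.List.pyRange 0 (m : Int) 1).map (rowA w h_)
      ++ List.replicate (H - m) (List.replicate w.toNat 0) := by
  induction m with
  | zero => simp [PySem.List.pyRange_one_eq_nil]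
  | succ j ih =>
    have hcast : ((j + 1 : Nat) : Int) = (j : Int) + 1 := by push_cast; ring
    rw [hcast, PySem.List.pyRange_one_succ_right (by omega)]
    rw [List.foldl_append, List.map_append, ih (by omega)]
    have hlenP : ((PySem.List.pyRange 0 (j : Int) 1).map (rowA w h_)).length = j := by
      simp [PySem.List.length_pyRange_one]
    simp only [List.foldl, List.map_cons, List.map_nil]
    rw [fold_set_factor _ _ _ j (by simp [hlenP]; omega)]
    have hrep : List.replicate (H - j) (List.replicate w.toNat (0 : Int))
        = List.replicate w.toNat 0 :: List.replicate (H - (j + 1)) (List.replicate w.toNat 0) := by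
      have h1 : H - j = (H - (j + 1)) + 1 := by omega
      rw [h1, List.replicate_succ]
    have hget : PySem.List.pyGetD
        ((PySem.List.pyRange 0 (j : Int) 1).map (rowA w h_)
          ++ List.replicate (H - j) (List.replicate w.toNat (0 : Int))) ((j : Nat) : Int) []
        = List.replicate w.toNat 0 := by
      rw [hrep, PySem.List.pyGetD_natCast]
      have hgd := getD_append_front ((PySem.List.pyRange 0 (j : Int) 1).map (rowA w h_))
        (List.replicate w.toNat (0 : Int)) (List.replicate (H - (j + 1)) (List.replicate w.toNat 0)) []
      rw [hlenP] at hgd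
      exact hgd
    rw [hget]
    have hw : PySem.List.pyRange 0 w 1 = PySem.List.pyRange 0 ((w.toNat : Nat) : Int) 1 := by
      rcases le_or_gt w 0 with hw0 | hw0
      · rw [PySem.List.pyRange_one_eq_nil hw0, PySem.List.pyRange_one_eq_nil (by omega)]
      · congr 1
        omega
    rw [hw, fill_row (cellA w h_ ((j : Nat) : Int)) w.toNat w.toNat le_rfl]
    simp only [Nat.sub_self, List.replicate_zero, List.append_nil]
    rw [PySem.List.pySetD_natCast]
    have hst := set_append_front ((PySem.List.pyRange 0 (j : Int) 1).map (rowA w h_)) (H - j)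
      (by omega) (List.replicate w.toNat (0 : Int))
      ((PySem.List.pyRange 0 ((w.toNat : Nat) : Int) 1).map (cellA w h_ ((j : Nat) : Int)))
    rw [hlenP] at hst
    rw [hst]
    have hrw : (PySem.List.pyRange 0 ((w.toNat : Nat) : Int) 1).map (cellA w h_ ((j : Nat) : Int))
        = rowA w h_ ((j : Nat) : Int) := by
      rw [rowA, hw]
    rw [hrw]
    have hsub : H - j - 1 = H - (j + 1) := by omega
    rw [hsub]
    simp

-- A computes the per-row map of cellA
lemma innerCells_eq_map (w h_ : Int) :
    innerCells w h_ = (PySem.List.pyRange 0 h_ 1).map (rowA w h_) := by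
  unfold innerCells
  rw [createBoard_eq]
  have hfun : (fun (A : List (List Int)) row =>
      (PySem.List.pyRange 0 w 1).foldl (fun A col =>
        if row = 0 ∨ col = 0 then
          PySem.List.pySetD A row (PySem.List.pySetD (PySem.List.pyGetD A row []) col 0)
        else if row = h_ - 1 ∨ col = w - 1 then
          PySem.List.pySetD A row (PySem.List.pySetD (PySem.List.pyGetD A row []) col 0)
        else
          PySem.List.pySetD A row (PySem.List.pySetD (PySem.List.pyGetD A row []) col 1)) A)
      = (fun A row => (PySem.List.pyRange 0 w 1).foldl (fun A col =>
          PySem.List.pySetD A row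
            (PySem.List.pySetD (PySem.List.pyGetD A row []) col (cellA w h_ row col))) A) := by
    funext A row
    rw [body_eq]
  rw [hfun]
  rcases le_or_gt h_ 0 with hh | hh
  · rw [PySem.List.pyRange_one_eq_nil hh]
    simp [Int.toNat_of_nonpos hh]
  · obtain ⟨H, hH⟩ : ∃ H : Nat, h_ = (H : Int) := ⟨h_.toNat, by omega⟩
    subst hH
    have hfb := fill_board w (H : Int) H H le_rfl
    simpa using hfb

-- the two row shapes agree on every row index
lemma rowA_cases (w h_ r : Int) :
    rowA w h_ r = if r = 0 ∨ r = h_ - 1 then List.replicate w.toNat 0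
      else (PySem.List.pyRange 0 w 1).map (fun c => if c = 0 ∨ c = w - 1 then 0 else 1) := by
  unfold rowA
  split_ifs with hb
  · have hcell : ∀ c ∈ PySem.List.pyRange 0 w 1, cellA w h_ r c = 0 := by
      intro c _
      unfold cellA
      rcases hb with hb | hb <;> split_ifs <;> simp_all
    rw [List.map_congr_left hcell, List.map_const']
    simp [PySem.List.length_pyRange_one]
  · push Not at hb
    refine List.map_congr_left (fun c _ => ?_)
    unfold cellA
    split_ifs <;> simp_all

-- ===== VERDICT (by name: the statement is the Claim_ definition above) =====
theorem innerCells_spec : Claim_equal_innerCells := by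
  intro w h_ _
  unfold Spec_innerCells innerCells_alt
  rw [innerCells_eq_map]
  rcases le_or_gt h_ 0 with hh | hh
  · rw [if_pos hh, PySem.List.pyRange_one_eq_nil hh, List.map_nil]
  · rw [if_neg (by omega)]
    exact List.map_congr_left (fun r _ => rowA_cases w h_ r)
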